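-- pv_equiv track=rewrite | github.com/Mehul623248/BetterMusicRecommender | backend/rec.py | getRidOfSpaces
-- ===== SOURCE A (Python) =====
-- def getRidOfSpaces(name):
--      name = name.strip() #just to be safe about trailing spaces
--      newName = ""
--      for i in range(len(name)):
--         if name[i] == " " and name[i+1] != " ":
--             newName = newName + "+"
--         elif name[i] == " ":
--            newName = newName
--         else:
--             newName = newName + name[i]
--
--      name = newName
--
--      return name
-- ===== SOURCE B (Python) =====
-- def getRidOfSpaces(name):
--     return "+".join(filter(None, name.strip().split(" ")))
-- ===== Notes on version B (the rewrite author's own statement) =====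
-- stated objective: idiomatic
-- what changed: replaced the index-based character scan with one-char lookahead and quadratic string concatenation by strip/split(" ")/filter/join, which collapses space runs by dropping empty tokens
import Mathlib
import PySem

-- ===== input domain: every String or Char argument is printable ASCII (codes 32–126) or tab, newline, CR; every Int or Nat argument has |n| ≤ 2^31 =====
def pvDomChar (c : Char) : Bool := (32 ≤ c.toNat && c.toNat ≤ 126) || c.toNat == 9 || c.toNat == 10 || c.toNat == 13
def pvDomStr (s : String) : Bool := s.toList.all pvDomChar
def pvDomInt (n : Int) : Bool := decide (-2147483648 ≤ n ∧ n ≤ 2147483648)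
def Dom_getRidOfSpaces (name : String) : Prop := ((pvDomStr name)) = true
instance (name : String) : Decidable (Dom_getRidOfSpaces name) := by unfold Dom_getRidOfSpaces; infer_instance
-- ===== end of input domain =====

-- B replaces A's index scan with lookahead (and quadratic string concatenation) by the
-- idiomatic strip / split(" ") / drop-empty-tokens / "+".join pipeline; return values agree on all inputs.

-- ===== PORT A =====
-- The loop builds newName as a list of chars (Python string concatenation), String.ofList at the end.
-- name[i] is always in range (i < len); name[i+1] is only evaluated when name[i] == ' ', which after
-- strip() never happens at the last index, so the pyGetD defaults are never the returned characters.
def getRidOfSpaces (name : String) : String :=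
  let s : List Char := (PySem.Str.strip name).toList
  let newName : List Char :=
    (PySem.List.pyRange 0 (PySem.Str.len (PySem.Str.strip name)) 1).foldl
      (fun acc i =>
        if PySem.List.pyGetD s i ' ' == ' ' && !(PySem.List.pyGetD s (i+1) '?' == ' ')
        then acc ++ ['+']
        else if PySem.List.pyGetD s i ' ' == ' ' then acc
        else acc ++ [PySem.List.pyGetD s i ' ']) []
  String.ofList newName

-- ===== PORT B =====
def getRidOfSpaces_alt (name : String) : String :=
  let toks : List (List Char) := PySem.Chars.splitOn (PySem.Str.strip name).toList [' ']
  String.ofList (PySem.Chars.join ['+'] (toks.filter (fun t => !t.isEmpty)))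

-- ===== PRECONDITION & SPEC =====
def Spec_getRidOfSpaces (name : String) (out : String) : Prop := out = getRidOfSpaces_alt name
instance (name : String) (out : String) : Decidable (Spec_getRidOfSpaces name out) := by unfold Spec_getRidOfSpaces; infer_instance

-- ===== CLAIM (what is proved, stated in full; the proofs are below) =====
def Claim_equal_getRidOfSpaces : Prop := ∀ (name : String), Dom_getRidOfSpaces name → Spec_getRidOfSpaces name (getRidOfSpaces name)

-- ===== LEMMAS AND PROOFS =====

-- What A's scan computes on a suffix of the stripped string.
def pvScan : List Char → List Char
  | [] => []
  | [c] => if c = ' ' then ['+'] else [c]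
  | c :: d :: t => (if c = ' ' then (if d = ' ' then [] else ['+']) else [c]) ++ pvScan (d :: t)

-- split on a single space, structurally.
def pvSplitSp : List Char → List (List Char)
  | [] => [[]]
  | c :: t => if c = ' ' then [] :: pvSplitSp t
              else match pvSplitSp t with
                   | [] => [[c]]
                   | p :: ps => (c :: p) :: ps

def pvConsHead (x : List Char) : List (List Char) → List (List Char)
  | [] => [x]
  | p :: ps => (x ++ p) :: ps

theorem pvSplitSp_ne (c : Char) (t : List Char) {p : List Char} {ps : List (List Char)}
    (hc : c ≠ ' ') (hs : pvSplitSp t = p :: ps) : pvSplitSp (c :: t) = (c :: p) :: ps := by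
  simp only [pvSplitSp, if_neg hc]
  rw [hs]

theorem pvSplitSp_ne_nil (l : List Char) : pvSplitSp l ≠ [] := by
  cases l with
  | nil => simp [pvSplitSp]
  | cons c t =>
    simp only [pvSplitSp]
    split
    · simp
    · cases h : pvSplitSp t <;> simp

theorem pvGo_spec : ∀ (fuel : Nat) (l cur : List Char) (acc : List (List Char)),
    l.length < fuel →
    PySem.Chars.splitOn.go [' '] fuel l cur acc = acc.reverse ++ pvConsHead cur.reverse (pvSplitSp l) := by
  intro fuel
  induction fuel with
  | zero => intro l cur acc h; omega
  | succ f ih =>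
    intro l cur acc h
    cases l with
    | nil => simp [PySem.Chars.splitOn.go, pvSplitSp, pvConsHead]
    | cons c rest =>
      by_cases hc : c = ' '
      · subst hc
        have : PySem.Chars.splitOn.go [' '] (f+1) (' ' :: rest) cur acc
            = PySem.Chars.splitOn.go [' '] f rest [] (cur.reverse :: acc) := by
          simp [PySem.Chars.splitOn.go, List.isPrefixOf]
        rw [this, ih rest [] (cur.reverse :: acc) (by simpa using Nat.lt_of_succ_lt_succ h)]
        simp [pvSplitSp, pvConsHead]
        cases hs : pvSplitSp rest with
        | nil => exact absurd hs (pvSplitSp_ne_nil rest)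
        | cons p ps => simp [pvConsHead]
      · have : PySem.Chars.splitOn.go [' '] (f+1) (c :: rest) cur acc
            = PySem.Chars.splitOn.go [' '] f rest (c :: cur) acc := by
          simp [PySem.Chars.splitOn.go, List.isPrefixOf, hc]
          intro h'; exact absurd h'.symm hc
        rw [this, ih rest (c :: cur) acc (by simpa using Nat.lt_of_succ_lt_succ h)]
        simp [pvSplitSp, hc]
        cases hs : pvSplitSp rest with
        | nil => exact absurd hs (pvSplitSp_ne_nil rest)
        | cons p ps => simp [pvConsHead]

theorem pvSplitOn_eq (l : List Char) : PySem.Chars.splitOn l [' '] = pvSplitSp l := by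
  have h := pvGo_spec (l.length + 1) l [] [] (by omega)
  unfold PySem.Chars.splitOn
  rw [h]
  cases hs : pvSplitSp l with
  | nil => exact absurd hs (pvSplitSp_ne_nil l)
  | cons p ps => simp [pvConsHead]

theorem pvJoin_cons (c : Char) (x : List Char) (l : List (List Char)) :
    PySem.Chars.join ['+'] ((c :: x) :: l) = c :: PySem.Chars.join ['+'] (x :: l) := by
  cases l with
  | nil => simp [PySem.Chars.join, List.intercalate]
  | cons y ys => simp [PySem.Chars.join, List.intercalate]

theorem pvFilter_has_token : ∀ (cs : List Char), cs ≠ [] → cs.getLast? ≠ some ' ' →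
    (pvSplitSp cs).filter (fun t => !t.isEmpty) ≠ [] := by
  intro cs
  induction cs with
  | nil => intro h; exact absurd rfl h
  | cons c t ih =>
    intro _ hlast
    cases t with
    | nil =>
      have hc : c ≠ ' ' := by simpa using hlast
      simp [pvSplitSp, hc]
    | cons d t' =>
      have hlast' : (d :: t').getLast? ≠ some ' ' := by
        simpa [List.getLast?_cons_cons] using hlast
      by_cases hc : c = ' '
      · subst hc
        simp only [pvSplitSp, if_pos rfl, List.filter_cons]
        simpa using ih (by simp) hlast'
      · cases hs : pvSplitSp (d :: t') with
        | nil => exact absurd hs (pvSplitSp_ne_nil _)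
        | cons p ps =>
          rw [pvSplitSp_ne c _ hc hs]
          simp

theorem pvScan_join : ∀ (cs : List Char), cs.getLast? ≠ some ' ' →
    pvScan cs = (if cs.head? = some ' ' then ['+'] else [])
      ++ PySem.Chars.join ['+'] ((pvSplitSp cs).filter (fun t => !t.isEmpty)) := by
  intro cs
  induction cs with
  | nil => intro _; simp [pvScan, pvSplitSp, PySem.Chars.join, List.intercalate]
  | cons c t ih =>
    intro hlast
    cases t with
    | nil =>
      have hc : c ≠ ' ' := by simpa using hlast
      simp [pvScan, pvSplitSp, hc, PySem.Chars.join, List.intercalate]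
    | cons d t' =>
      have hlast' : (d :: t').getLast? ≠ some ' ' := by
        simpa [List.getLast?_cons_cons] using hlast
      have IH := ih hlast'
      by_cases hc : c = ' '
      · subst hc
        by_cases hd : d = ' '
        · subst hd
          simp only [pvScan, if_pos rfl, List.nil_append] at *
          rw [IH]
          simp [pvSplitSp]
        · simp only [pvScan, if_pos rfl, if_neg hd]
          rw [IH]
          simp [pvSplitSp, hd]
      · by_cases hd : d = ' '
        · subst hd
          -- token [c], then a space run
          have ht : t' ≠ [] := by
            intro h; subst h; simp at hlast
          have hlastt' : t'.getLast? ≠ some ' ' := by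
            cases t' with
            | nil => simp at ht
            | cons e u => simpa [List.getLast?_cons_cons] using hlast'
          have hF := pvFilter_has_token t' ht hlastt'
          simp only [pvScan, if_neg hc, if_pos rfl]
          rw [IH]
          simp only [pvSplitSp, if_neg hc, if_pos rfl]
          simp only [List.head?_cons, Option.some.injEq, if_pos rfl]
          cases hFs : (pvSplitSp t').filter (fun t => !t.isEmpty) with
          | nil => exact absurd hFs hF
          | cons x xs =>
            simp [pvSplitSp, hFs, pvJoin_cons, PySem.Chars.join, List.intercalate, hc]
        · cases hs : pvSplitSp t' with
          | nil => exact absurd hs (pvSplitSp_ne_nil _)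
          | cons p ps =>
            have e1 : pvSplitSp (d :: t') = (d :: p) :: ps := pvSplitSp_ne d t' hd hs
            have e2 : pvSplitSp (c :: d :: t') = (c :: d :: p) :: ps := pvSplitSp_ne c _ hc e1
            simp only [pvScan, if_neg hc, if_neg hd]
            rw [IH, e1, e2]
            simp only [List.head?_cons, Option.some.injEq, if_neg hd, List.nil_append]
            have h1 : (((d :: p) :: ps).filter (fun t => !t.isEmpty)) = (d :: p) :: ps.filter (fun t => !t.isEmpty) := by
              simp
            have h2 : (((c :: d :: p) :: ps).filter (fun t => !t.isEmpty)) = (c :: d :: p) :: ps.filter (fun t => !t.isEmpty) := by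
              simp
            rw [h1, h2]
            simp [pvJoin_cons, hc]

-- A's loop over the tail of the range, as pvScan of the corresponding suffix.
theorem pvLoop_eq (s : List Char) : ∀ (k : Nat) (acc : List Char),
    (PySem.List.pyRange (k : Int) ((s.length : Nat) : Int) 1).foldl
      (fun acc i =>
        if PySem.List.pyGetD s i ' ' == ' ' && !(PySem.List.pyGetD s (i+1) '?' == ' ')
        then acc ++ ['+']
        else if PySem.List.pyGetD s i ' ' == ' ' then acc
        else acc ++ [PySem.List.pyGetD s i ' ']) acc
    = acc ++ pvScan (s.drop k) := by
  intro k
  induction hk : s.length - k generalizing k with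
  | zero =>
    intro acc
    have : s.length ≤ k := by omega
    rw [PySem.List.pyRange_one_eq_nil (by exact_mod_cast this)]
    simp [List.drop_eq_nil_of_le this, pvScan]
  | succ n ih =>
    intro acc
    have hlt : k < s.length := by omega
    rw [PySem.List.pyRange_one_cons (by exact_mod_cast hlt)]
    simp only [List.foldl_cons]
    have hk1 : ((k : Int) + 1) = ((k+1 : Nat) : Int) := by push_cast; ring
    rw [hk1, ih (k+1) (by omega)]
    have g0 : PySem.List.pyGetD s ((k : Nat) : Int) ' ' = s[k] := by
      rw [PySem.List.pyGetD_natCast, List.getD_eq_getElem _ _ hlt]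
    have hdk : s.drop k = s[k] :: s.drop (k+1) := List.drop_eq_getElem_cons hlt
    by_cases hend : k + 1 < s.length
    · have g1 : PySem.List.pyGetD s (((k+1 : Nat) : Nat) : Int) '?' = s[k+1] := by
        rw [PySem.List.pyGetD_natCast, List.getD_eq_getElem _ _ hend]
      have hdk1 : s.drop (k+1) = s[k+1] :: s.drop (k+2) := List.drop_eq_getElem_cons hend
      rw [g0, g1, hdk, hdk1]
      simp only [pvScan]
      by_cases h1 : s[k] = ' ' <;> by_cases h2 : s[k+1] = ' ' <;>
        simp [h1, h2]
    · have hlen : s.length = k + 1 := by omega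
      have g1 : PySem.List.pyGetD s (((k+1 : Nat) : Nat) : Int) '?' = '?' := by
        rw [PySem.List.pyGetD_natCast, List.getD_eq_default]
        omega
      have hdk1 : s.drop (k+1) = [] := List.drop_eq_nil_of_le (by omega)
      rw [g0, g1, hdk, hdk1]
      simp only [pvScan]
      by_cases h1 : s[k] = ' ' <;> simp [h1, pvScan]

-- after strip, the first and last characters are never spaces
theorem pvStrip_last (l : List Char) : (PySem.Chars.strip l).getLast? ≠ some ' ' := by
  unfold PySem.Chars.strip PySem.Chars.rstrip
  rw [List.getLast?_reverse]
  intro h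
  have := List.head?_dropWhile_not PySem.Chars.isspace (PySem.Chars.lstrip l).reverse
  rw [h] at this
  simp [PySem.Chars.isspace] at this

theorem pvStrip_head (l : List Char) : (PySem.Chars.strip l).head? ≠ some ' ' := by
  unfold PySem.Chars.strip PySem.Chars.rstrip PySem.Chars.lstrip
  set m := List.dropWhile PySem.Chars.isspace l with hm
  have hmh : ∀ a, m.head? = some a → PySem.Chars.isspace a = false := by
    intro a ha
    have := List.head?_dropWhile_not PySem.Chars.isspace l
    rw [← hm, ha] at this; simpa using this
  have hpre : (List.dropWhile PySem.Chars.isspace m.reverse).reverse <+: m := by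
    have h1 : List.dropWhile PySem.Chars.isspace m.reverse <:+ m.reverse :=
      List.dropWhile_suffix _
    have h2 := (List.reverse_prefix
      (l₁ := List.dropWhile PySem.Chars.isspace m.reverse) (l₂ := m.reverse)).mpr h1
    simpa using h2
  obtain ⟨t2, ht2⟩ := hpre
  intro h
  cases hr : (List.dropWhile PySem.Chars.isspace m.reverse).reverse with
  | nil => rw [hr] at h; simp at h
  | cons x xs =>
    rw [hr] at h ht2
    have hh : m.head? = some ' ' := by
      rw [← ht2, List.head?_append]
      simp only [List.head?_cons] at h ⊢
      rw [h]; rfl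
    have := hmh ' ' hh
    simp [PySem.Chars.isspace] at this

-- ===== VERDICT (by name: the statement is the Claim_ definition above) =====
theorem getRidOfSpaces_spec : Claim_equal_getRidOfSpaces := by
  intro name _
  unfold Spec_getRidOfSpaces getRidOfSpaces getRidOfSpaces_alt
  dsimp only
  have hcs : (PySem.Str.strip name).toList = PySem.Chars.strip name.toList :=
    PySem.Str.toList_strip name
  have hlast : (PySem.Str.strip name).toList.getLast? ≠ some ' ' := by
    rw [hcs]; exact pvStrip_last _
  have hhead : (PySem.Str.strip name).toList.head? ≠ some ' ' := by
    rw [hcs]; exact pvStrip_head _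
  have hlen : PySem.Str.len (PySem.Str.strip name) = (((PySem.Str.strip name).toList.length : Nat) : Int) := PySem.Str.len_eq _
  rw [hlen]
  have h0 : (0 : Int) = ((0 : Nat) : Int) := by norm_num
  rw [h0]
  rw [pvLoop_eq (PySem.Str.strip name).toList 0 []]
  rw [pvSplitOn_eq]
  rw [List.nil_append, List.drop_zero, pvScan_join _ hlast, if_neg hhead, List.nil_append]
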